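-- pv_equiv track=rewrite | github.com/InfiniTensor/InfiniCore | test/infiniop/conv1d.py | inferShapeStride
-- ===== SOURCE A (Python) =====
-- from typing import List, Tuple
--
-- def inferShapeStride(
--     x_shape: List[int],
--     w_shape: List[int],
--     pads: List[int],
--     strides: List[int],
--     dilations: List[int],
-- ) -> Tuple[Tuple[int, ...], Tuple[int, ...]]:
--     # x_shape: [B, L, Cin], w_shape: [2*Cout, Cin, K]
--     # output: [B, L, Cout] where Cout = w_shape[0] // 2
--     B, L, Cin = x_shape
--     Cout2, _, K = w_shape
--     assert Cout2 % 2 == 0, "weight out_channels must be even for gated conv1d"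
--     Cout = Cout2 // 2
--
--     # For conv1d, we maintain the sequence length L
--     output_shape = (B, L, Cout)
--     output_strides = [1]
--     for s in reversed(output_shape[1:]):
--         output_strides.insert(0, output_strides[0] * s)
--     output_strides = tuple(output_strides)
--     return output_shape, output_strides
-- ===== SOURCE B (Python) =====
-- from typing import List, Tuple
--
-- def inferShapeStride(
--     x_shape: List[int],
--     w_shape: List[int],
--     pads: List[int],
--     strides: List[int],
--     dilations: List[int],
-- ) -> Tuple[Tuple[int, ...], Tuple[int, ...]]:
--     # x_shape: [B, L, Cin], w_shape: [2*Cout, Cin, K]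
--     B, L, Cin = x_shape
--     Cout2, _, K = w_shape
--     assert Cout2 % 2 == 0, "weight out_channels must be even for gated conv1d"
--     Cout = Cout2 // 2
--     # contiguous strides for (B, L, Cout), written as a closed-form tuple
--     return (B, L, Cout), (L * Cout, Cout, 1)
-- ===== Notes on version B (the rewrite author's own statement) =====
-- stated objective: simpler
-- what changed: Replaces the right-to-left insert(0, ...) stride-accumulation loop with a closed-form stride tuple (L*Cout, Cout, 1).
import Mathlib
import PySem

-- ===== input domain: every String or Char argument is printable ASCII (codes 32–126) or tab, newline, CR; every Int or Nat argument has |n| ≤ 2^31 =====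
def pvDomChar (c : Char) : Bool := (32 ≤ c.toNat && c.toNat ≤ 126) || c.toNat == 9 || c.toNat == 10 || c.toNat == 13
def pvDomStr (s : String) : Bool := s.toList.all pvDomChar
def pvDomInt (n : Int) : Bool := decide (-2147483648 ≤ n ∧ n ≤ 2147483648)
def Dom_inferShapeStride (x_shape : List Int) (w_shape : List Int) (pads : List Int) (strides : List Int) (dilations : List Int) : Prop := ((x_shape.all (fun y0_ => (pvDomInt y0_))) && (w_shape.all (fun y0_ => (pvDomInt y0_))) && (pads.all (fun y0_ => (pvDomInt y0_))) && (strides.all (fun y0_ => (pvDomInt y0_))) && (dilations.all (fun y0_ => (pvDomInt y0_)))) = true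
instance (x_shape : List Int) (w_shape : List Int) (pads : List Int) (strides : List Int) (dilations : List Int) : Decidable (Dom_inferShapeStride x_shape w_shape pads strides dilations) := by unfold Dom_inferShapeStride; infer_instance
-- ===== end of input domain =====

-- B replaces A's right-to-left stride-accumulation loop by the closed-form tuple (L*Cout, Cout, 1); same return value.
-- ===== PORT A =====
def inferShapeStride (x_shape : List Int) (w_shape : List Int) (pads : List Int) (strides : List Int) (dilations : List Int) : List Int × List Int :=
  match x_shape, w_shape with
  | [B, L, _Cin], [Cout2, _, _K] =>
      -- assert Cout2 % 2 == 0 (Pre_ excludes odd Cout2)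
      let Cout := PySem.Int.floordiv Cout2 2
      let output_shape := [B, L, Cout]
      -- output_strides = [1]; for s in reversed(output_shape[1:]): output_strides.insert(0, output_strides[0] * s)
      let output_strides :=
        ((PySem.List.slice output_shape (some 1) none).reverse).foldl
          (fun acc s => (acc.headD 0 * s) :: acc) [(1 : Int)]
      (output_shape, output_strides)
  | _, _ => ([], [])  -- unreachable under Pre_ (Python raises ValueError on unpacking)

-- ===== PORT B =====
def inferShapeStride_alt (x_shape : List Int) (w_shape : List Int) (pads : List Int) (strides : List Int) (dilations : List Int) : List Int × List Int :=
  if x_shape.length = 3 ∧ w_shape.length = 3 then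
    let B := x_shape.headD 0
    let L := x_shape.getD 1 0
    let Cout := PySem.Int.floordiv (w_shape.headD 0) 2
    ([B, L, Cout], [L * Cout, Cout, 1])
  else ([], [])  -- unreachable under Pre_

-- ===== PRECONDITION & SPEC =====
-- Pre_ excludes inputs where Python A raises: x_shape/w_shape not of length 3 (ValueError on
-- unpacking) and odd w_shape[0] (AssertionError).
def Pre_inferShapeStride (x_shape : List Int) (w_shape : List Int) (pads : List Int) (strides : List Int) (dilations : List Int) : Prop :=
  x_shape.length = 3 ∧ w_shape.length = 3 ∧ (2 : Int) ∣ w_shape.headD 0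
instance (x_shape : List Int) (w_shape : List Int) (pads : List Int) (strides : List Int) (dilations : List Int) : Decidable (Pre_inferShapeStride x_shape w_shape pads strides dilations) := by unfold Pre_inferShapeStride; infer_instance

def pvWitness_inferShapeStride : List Int × List Int × List Int × List Int × List Int :=
  ([2, 5, 3], [8, 3, 4], [0], [1], [1])

def Spec_inferShapeStride (x_shape : List Int) (w_shape : List Int) (pads : List Int) (strides : List Int) (dilations : List Int) (out : List Int × List Int) : Prop := out = inferShapeStride_alt x_shape w_shape pads strides dilations
instance (x_shape : List Int) (w_shape : List Int) (pads : List Int) (strides : List Int) (dilations : List Int) (out : List Int × List Int) : Decidable (Spec_inferShapeStride x_shape w_shape pads strides dilations out) := by unfold Spec_inferShapeStride; infer_instance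

-- ===== CLAIM (what is proved, stated in full; the proofs are below) =====
def Claim_equal_inferShapeStride : Prop := ∀ (x_shape : List Int) (w_shape : List Int) (pads : List Int) (strides : List Int) (dilations : List Int), Dom_inferShapeStride x_shape w_shape pads strides dilations → Pre_inferShapeStride x_shape w_shape pads strides dilations → Spec_inferShapeStride x_shape w_shape pads strides dilations (inferShapeStride x_shape w_shape pads strides dilations)

-- ===== LEMMAS AND PROOFS =====

-- ===== VERDICT (by name: the statement is the Claim_ definition above) =====
theorem inferShapeStride_spec : Claim_equal_inferShapeStride := by
  intro x w p s d _ hpre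
  obtain ⟨hx, hw, _⟩ := hpre
  match x, hx, w, hw with
  | [B, L, Cin], _, [C2, Ci, K], _ =>
    simp [Spec_inferShapeStride, inferShapeStride, inferShapeStride_alt,
      PySem.List.slice_from_one, List.foldl]
    exact mul_comm _ _
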